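-- pv_equiv track=rewrite | github.com/ariuk44/retake_exam_prep | day_1.py | isMadhavArray
-- ===== SOURCE A (Python) =====
-- def isMadhavArray(arr):
--     n = len(arr)
--     k = 1
--     total_len = 1
--     while total_len < n:
--         k += 1
--         total_len += k
--     if total_len != n:
--         return 0
--     target = arr[0]
--     idx = 1
--     group_size = 2
--     while idx < n:
--         if sum(arr[idx: idx + group_size]) != target:
--             return 0
--         idx += group_size
--         group_size += 1
--     return 1
-- ===== SOURCE B (Python) =====
-- def isMadhavArray(arr):
--     if not arr:
--         return 0
--     target = arr[0]
--     ok = True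
--     group = 2
--     acc = 0
--     cnt = 0
--     for x in arr[1:]:
--         acc += x
--         cnt += 1
--         if cnt == group:
--             if acc != target:
--                 ok = False
--             group += 1
--             acc = 0
--             cnt = 0
--     return 1 if ok and cnt == 0 else 0
-- ===== Notes on version B (the rewrite author's own statement) =====
-- stated objective: alternative
-- what changed: Replaces A's triangular-length pre-loop plus slice-and-sum group loop with a single element-wise fold over arr[1:] that keeps a running group sum and counter, with an exact-boundary check (cnt == 0) at the end standing in for the length test.
import Mathlib
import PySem

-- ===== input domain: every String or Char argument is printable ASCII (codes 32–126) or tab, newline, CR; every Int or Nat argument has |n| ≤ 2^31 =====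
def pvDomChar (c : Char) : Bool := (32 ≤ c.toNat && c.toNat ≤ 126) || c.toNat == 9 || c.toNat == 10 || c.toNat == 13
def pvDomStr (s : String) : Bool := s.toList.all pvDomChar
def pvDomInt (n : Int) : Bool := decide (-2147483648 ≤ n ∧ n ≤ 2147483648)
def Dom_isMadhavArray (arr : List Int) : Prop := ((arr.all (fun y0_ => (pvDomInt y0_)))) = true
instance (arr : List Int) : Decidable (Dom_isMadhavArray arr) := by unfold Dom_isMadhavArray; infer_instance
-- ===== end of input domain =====

-- B replaces A's triangular-length pre-loop plus slice-and-sum group loop by one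
-- element-wise fold with a running group sum; same O(n) cost (objective: alternative).

-- ===== PORT A =====

-- first while loop of A: while total_len < n: k += 1; total_len += k — returns final total_len
def pvLoopA (n k total : Nat) : Nat :=
  if total < n then pvLoopA n (k + 1) (total + (k + 1)) else total
termination_by n - total
decreasing_by omega

-- second while loop of A: while idx < n: check sum(arr[idx:idx+group_size]); advance
def pvLoop2 (arr : List Int) (n : Nat) (target : Int) (idx gs : Nat) (h : 1 ≤ gs) : Int :=
  if idx < n then
    if (PySem.List.slice arr (some (idx : Int)) (some ((idx : Int) + (gs : Int)))).sum ≠ target then 0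
    else pvLoop2 arr n target (idx + gs) (gs + 1) (by omega)
  else 1
termination_by n - idx
decreasing_by omega

def isMadhavArray (arr : List Int) : Int :=
  let n := arr.length
  let total := pvLoopA n 1 1
  if total ≠ n then 0
  else
    match PySem.List.pyGet? arr 0 with
    | none => 0   -- unreachable: total = n forces n ≥ 1
    | some target => pvLoop2 arr n target 1 2 (by omega)

-- ===== PORT B =====

def pvStepB (target : Int) (st : Bool × Nat × Int × Nat) (x : Int) : Bool × Nat × Int × Nat :=
  let ok := st.1
  let group := st.2.1
  let acc := st.2.2.1 + x
  let cnt := st.2.2.2 + 1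
  if cnt = group then ((ok && decide (acc = target)), group + 1, 0, 0)
  else (ok, group, acc, cnt)

-- final 'return 1 if ok and cnt == 0 else 0' of B
def pvOutB (st : Bool × Nat × Int × Nat) : Bool := st.1 && decide (st.2.2.2 = 0)

def isMadhavArray_alt (arr : List Int) : Int :=
  match arr with
  | [] => 0
  | target :: _ =>
    let st := (PySem.List.slice arr (some 1) none).foldl (pvStepB target) (true, 2, 0, 0)
    if pvOutB st then 1 else 0

-- ===== PRECONDITION & SPEC =====
def Spec_isMadhavArray (arr : List Int) (out : Int) : Prop := out = isMadhavArray_alt arr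
instance (arr : List Int) (out : Int) : Decidable (Spec_isMadhavArray arr out) := by unfold Spec_isMadhavArray; infer_instance

-- ===== CLAIM (what is proved, stated in full; the proofs are below) =====
def Claim_equal_isMadhavArray : Prop := ∀ (arr : List Int), Dom_isMadhavArray arr → Spec_isMadhavArray arr (isMadhavArray arr)

-- ===== LEMMAS AND PROOFS =====

def Tri (gs m : Nat) : Prop :=
  if m = 0 then True
  else if gs = 0 then False
  else gs ≤ m ∧ Tri (gs + 1) (m - gs)
termination_by m
decreasing_by omega

lemma Tri_zero (gs : Nat) : Tri gs 0 := by
  rw [Tri]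
  simp

lemma Tri_pos {gs m : Nat} (hm : ¬ m = 0) (hgs : ¬ gs = 0) :
    Tri gs m ↔ (gs ≤ m ∧ Tri (gs + 1) (m - gs)) := by
  rw [Tri, if_neg hm, if_neg hgs]

-- m is a sum gs + (gs+1) + ... + k (possibly empty)
-- element-wise group checker: acc/cnt are the sum/size of the current partial group
def runP (t : Int) (gs : Nat) (acc : Int) (cnt : Nat) : List Int → Bool
  | [] => decide (cnt = 0)
  | x :: xs =>
    if cnt + 1 = gs then (decide (acc + x = t)) && runP t (gs + 1) 0 0 xs
    else runP t gs (acc + x) (cnt + 1) xs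

lemma runP_group (t : Int) : ∀ (l : List Int) (gs : Nat) (acc : Int) (cnt : Nat), cnt < gs →
    runP t gs acc cnt l =
      if l.length < gs - cnt then decide (l.length = 0 ∧ cnt = 0)
      else (decide (acc + (l.take (gs - cnt)).sum = t)) && runP t (gs + 1) 0 0 (l.drop (gs - cnt)) := by
  intro l
  induction l with
  | nil =>
    intro gs acc cnt h
    simp [runP]
    omega
  | cons x xs ih =>
    intro gs acc cnt h
    by_cases hc : cnt + 1 = gs
    · have hgc : gs - cnt = 1 := by omega
      simp [runP, hc, hgc, List.take, List.drop]
    · have hlt : cnt + 1 < gs := by omega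
      have hih := ih gs (acc + x) (cnt + 1) hlt
      have ht : List.take (gs - cnt) (x :: xs) = x :: List.take (gs - (cnt + 1)) xs := by
        conv_lhs => rw [show gs - cnt = (gs - (cnt + 1)) + 1 from by omega]
        rw [List.take_succ_cons]
      have hd : List.drop (gs - cnt) (x :: xs) = List.drop (gs - (cnt + 1)) xs := by
        conv_lhs => rw [show gs - cnt = (gs - (cnt + 1)) + 1 from by omega]
        rw [List.drop_succ_cons]
      simp only [runP, if_neg hc, hih, ht, hd, List.length_cons, List.sum_cons]
      by_cases hl : xs.length < gs - (cnt + 1)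
      · rw [if_pos hl, if_pos (by omega : xs.length + 1 < gs - cnt)]
        simp
      · rw [if_neg hl, if_neg (by omega : ¬ xs.length + 1 < gs - cnt)]
        simp [add_assoc]

lemma runP_true_tri (t : Int) : ∀ (m : Nat) (l : List Int) (gs : Nat), l.length = m → 1 ≤ gs →
    runP t gs 0 0 l = true → Tri gs l.length := by
  intro m
  induction m using Nat.strong_induction_on with
  | _ m ih =>
    intro l gs hm hgs hr
    rcases l with _ | ⟨x, xs⟩
    · rw [Tri]
      simp
    · rw [runP_group t (x :: xs) gs 0 0 (by omega)] at hr
      simp only [Nat.sub_zero] at hr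
      by_cases hl : (x :: xs).length < gs
      · rw [if_pos hl] at hr
        simp at hr
      · rw [if_neg hl] at hr
        rw [Bool.and_eq_true] at hr
        obtain ⟨-, hr2⟩ := hr
        have hlen : (List.drop gs (x :: xs)).length = (x :: xs).length - gs := by simp
        have hm' : (x :: xs).length - gs < m := by
          simp only [List.length_cons] at hm hl ⊢
          omega
        have htri := ih ((x :: xs).length - gs) hm' (List.drop gs (x :: xs)) (gs + 1) hlen
          (by omega) hr2
        rw [hlen] at htri
        rw [Tri_pos (by simp : ¬ ((x :: xs).length = 0)) (by omega : ¬ gs = 0)]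
        exact ⟨by omega, htri⟩

lemma loopA_eq_iff : ∀ (m n k total : Nat), n - total = m →
    (pvLoopA n k total = n ↔ (total ≤ n ∧ Tri (k + 1) (n - total))) := by
  intro m
  induction m using Nat.strong_induction_on with
  | _ m ih =>
    intro n k total hm
    rw [pvLoopA]
    by_cases h : total < n
    · rw [if_pos h]
      rw [ih (n - (total + (k + 1))) (by omega) n (k + 1) (total + (k + 1)) rfl]
      rw [Tri_pos (by omega : ¬ (n - total = 0)) (by omega : ¬ (k + 1 = 0))]
      rw [show n - total - (k + 1) = n - (total + (k + 1)) from by omega]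
      constructor
      · rintro ⟨h1, h2⟩
        exact ⟨by omega, by omega, h2⟩
      · rintro ⟨-, h1, h2⟩
        exact ⟨by omega, h2⟩
    · rw [if_neg h]
      constructor
      · intro he
        subst he
        exact ⟨le_refl _, by rw [show total - total = 0 from by omega]; exact Tri_zero _⟩
      · rintro ⟨h1, -⟩
        omega

lemma loop2_eq (arr : List Int) (t : Int) : ∀ (m idx gs : Nat) (h : 1 ≤ gs),
    arr.length - idx = m → idx ≤ arr.length → Tri gs (arr.length - idx) →
    pvLoop2 arr arr.length t idx gs h = if runP t gs 0 0 (arr.drop idx) then 1 else 0 := by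
  intro m
  induction m using Nat.strong_induction_on with
  | _ m ih =>
    intro idx gs h hm hle htri
    rw [pvLoop2]
    by_cases hlt : idx < arr.length
    · rw [if_pos hlt]
      rw [Tri_pos (by omega : ¬ (arr.length - idx = 0)) (by omega : ¬ gs = 0)] at htri
      obtain ⟨hgsle, htri'⟩ := htri
      have hslice : PySem.List.slice arr (some (idx : Int)) (some ((idx : Int) + (gs : Int))) =
          (arr.drop idx).take gs := PySem.List.slice_natCast_add arr idx gs
      rw [hslice]
      have hdl : (arr.drop idx).length = arr.length - idx := by simp
      rw [runP_group t (arr.drop idx) gs 0 0 (by omega)]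
      simp only [Nat.sub_zero]
      rw [if_neg (by omega : ¬ (arr.drop idx).length < gs)]
      have hdd : (arr.drop idx).drop gs = arr.drop (idx + gs) := by
        rw [List.drop_drop]
      have hrec := ih (arr.length - (idx + gs)) (by omega) (idx + gs) (gs + 1) (by omega) rfl
        (by omega) (by rw [show arr.length - (idx + gs) = arr.length - idx - gs from by omega]; exact htri')
      rw [hdd]
      by_cases hs : ((arr.drop idx).take gs).sum = t
      · simp [hs, hrec]
      · simp [hs]
    · rw [if_neg hlt]
      have : idx = arr.length := by omega
      subst this
      simp [runP]

lemma foldB_eq (t : Int) : ∀ (l : List Int) (ok : Bool) (gs : Nat) (acc : Int) (cnt : Nat),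
    pvOutB (l.foldl (pvStepB t) (ok, gs, acc, cnt)) = (ok && runP t gs acc cnt l) := by
  intro l
  induction l with
  | nil =>
    intro ok gs acc cnt
    rfl
  | cons x xs ih =>
    intro ok gs acc cnt
    simp only [List.foldl_cons]
    by_cases hc : cnt + 1 = gs
    · rw [show pvStepB t (ok, gs, acc, cnt) x = ((ok && decide (acc + x = t)), gs + 1, 0, 0)
        from by simp [pvStepB, hc]]
      rw [ih]
      simp only [runP, if_pos hc]
      rw [Bool.and_assoc]
    · rw [show pvStepB t (ok, gs, acc, cnt) x = (ok, gs, acc + x, cnt + 1)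
        from by simp [pvStepB, hc]]
      rw [ih]
      simp only [runP, if_neg hc]

lemma alt_eq_runP (t : Int) (rest : List Int) :
    isMadhavArray_alt (t :: rest) = if runP t 2 0 0 rest then 1 else 0 := by
  have hs : PySem.List.slice (t :: rest) (some 1) none = rest := by
    rw [show ((1 : Int)) = ((1 : Nat) : Int) from by norm_num, PySem.List.slice_from_natCast]
    simp
  have hf := foldB_eq t rest true 2 0 0
  rw [Bool.true_and] at hf
  simp only [isMadhavArray_alt, hs, hf]

-- ===== VERDICT (by name: the statement is the Claim_ definition above) =====
theorem isMadhavArray_spec : Claim_equal_isMadhavArray := by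
  intro arr _
  unfold Spec_isMadhavArray
  rcases arr with _ | ⟨t, rest⟩
  · rw [isMadhavArray, isMadhavArray_alt]
    rw [pvLoopA]
    norm_num
  · rw [alt_eq_runP]
    rw [isMadhavArray]
    simp only [PySem.List.pyGet?_zero_cons]
    set n := (t :: rest).length with hn
    have hn1 : 1 ≤ n := by simp [hn]
    have hiff := loopA_eq_iff (n - 1) n 1 1 rfl
    by_cases he : pvLoopA n 1 1 = n
    · simp only [he, ne_eq, not_true_eq_false, if_false]
      have htri : Tri 2 (n - 1) := (hiff.mp he).2
      have hl2 := loop2_eq (t :: rest) t (n - 1) 1 2 (by omega) (by rw [← hn]) (by omega)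
        (by rw [← hn]; exact htri)
      rw [← hn] at hl2
      rw [hl2]
      simp
    · simp only [he, ne_eq, not_false_eq_true, if_true]
      by_cases hr : runP t 2 0 0 rest = true
      · exfalso
        have htri := runP_true_tri t rest.length rest 2 rfl (by omega) hr
        rw [show rest.length = n - 1 from by simp [hn]] at htri
        exact he (hiff.mpr ⟨by omega, htri⟩)
      · simp [hr]
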